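-- pv_equiv track=rewrite | github.com/mikhailchizhmar/LeetCode | medium/line_reflection.py | is_reflected_stolen
-- ===== SOURCE A (Python) =====
-- def is_reflected_stolen(points: list[list[int]]) -> bool:
--     minX = float("inf")
--     maxX = -float("inf")
--     seen = set()
--
--     for x, y in points:
--         minX = min(minX, x)
--         maxX = max(maxX, x)
--         seen.add((x, y))
--
--     summ = minX + maxX
--     for x, y in points:
--         if (summ - x, y) not in seen:
--             return False
--     return True
-- ===== SOURCE B (Python) =====
-- def is_reflected_stolen(points: list[list[int]]) -> bool:
--     if not points:
--         return True
--     summ = min(p[0] for p in points) + max(p[0] for p in points)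
--     groups = {}
--     for x, y in points:
--         groups.setdefault(y, set()).add(x)
--     for s in groups.values():
--         xs = sorted(s)
--         if xs != [summ - x for x in reversed(xs)]:
--             return False
--     return True
-- ===== Notes on version B (the rewrite author's own statement) =====
-- stated objective: alternative
-- what changed: B replaces A's hash-membership test of each mirrored point against a global set of (x,y) pairs with a sort-based palindrome check: it groups the distinct x-values by y, sorts each group, and compares the sorted list against its reversed image under x -> summ - x, so no membership lookup of mirrored points happens at all.
import Mathlib
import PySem

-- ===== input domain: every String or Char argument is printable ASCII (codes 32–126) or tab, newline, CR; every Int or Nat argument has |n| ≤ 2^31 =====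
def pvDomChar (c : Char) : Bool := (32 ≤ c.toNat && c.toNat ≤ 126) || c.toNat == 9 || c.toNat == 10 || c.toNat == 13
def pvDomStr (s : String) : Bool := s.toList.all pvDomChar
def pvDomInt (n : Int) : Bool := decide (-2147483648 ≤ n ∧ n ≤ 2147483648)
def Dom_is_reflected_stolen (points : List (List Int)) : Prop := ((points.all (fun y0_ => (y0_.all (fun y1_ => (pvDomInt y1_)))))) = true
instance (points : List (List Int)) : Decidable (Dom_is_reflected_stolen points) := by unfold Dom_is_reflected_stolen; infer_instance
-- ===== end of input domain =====

-- B groups the distinct x-values by y-coordinate, sorts each group, and checks that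
-- the sorted list equals its reverse mapped through x ↦ summ − x (a palindrome test),
-- instead of A's hash-membership probe of each mirrored point (objective: alternative).

-- `for x, y in points` unpacks a length-2 row (guaranteed by Pre_): x = row[0], y = row[1]
def pxv (p : List Int) : Int := p.headD 0
def pyv (p : List Int) : Int := (p.drop 1).headD 0

-- ===== PORT A =====
-- Python's minX/maxX start at ±float('inf'); on the Int domain that is modelled by
-- Option Int: `none` = "still infinite" (only possible while no point was seen), so
-- min(inf, x) = x is `stepMinA none x = some x` — exact on every admitted input.
def stepMinA (o : Option Int) (x : Int) : Option Int :=
  match o with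
  | none => some x
  | some m => some (min m x)

def stepMaxA (o : Option Int) (x : Int) : Option Int :=
  match o with
  | none => some x
  | some m => some (max m x)

def is_reflected_stolen (points : List (List Int)) : Bool :=
  let st := points.foldl
    (fun (acc : Option Int × Option Int × PySem.Set (Int × Int)) p =>
      (stepMinA acc.1 (pxv p),
       stepMaxA acc.2.1 (pxv p),
       acc.2.2.add (pxv p, pyv p)))
    (none, none, PySem.Set.empty)
  match st.1, st.2.1 with
  | some mn, some mx =>
      points.all (fun p => st.2.2.contains (mn + mx - pxv p, pyv p))
  | _, _ => true  -- empty input: both loops did nothing, Python returns True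

-- ===== PORT B =====
-- the grouping step of B: groups.setdefault(y, set()).add(x)
def stepG (d : PySem.Dict Int (PySem.Set Int)) (p : List Int) : PySem.Dict Int (PySem.Set Int) :=
  d.modify (pyv p) PySem.Set.empty (fun s => s.add (pxv p))

-- B's per-group test: xs = sorted(s); xs == [summ - x for x in reversed(xs)]
def mirrorSorted (summ : Int) (s : PySem.Set Int) : Bool :=
  let xs := PySem.List.sorted s (fun x => x) false
  xs == xs.reverse.map (fun x => summ - x)

def is_reflected_stolen_alt (points : List (List Int)) : Bool :=
  match points with
  | [] => true
  | _ :: _ =>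
    match PySem.List.min? (points.map pxv) (fun x => x) with
    | none => true  -- unreachable: points is nonempty here
    | some mn =>
      match PySem.List.max? (points.map pxv) (fun x => x) with
      | none => true  -- unreachable: points is nonempty here
      | some mx =>
        let summ := mn + mx
        let g := points.foldl stepG PySem.Dict.empty
        g.values.all (mirrorSorted summ)

-- ===== PRECONDITION & SPEC =====
-- Pre_ excludes exactly the rows Python cannot unpack as `x, y`: any row whose
-- length is not 2 makes `for x, y in points` raise ValueError in both A and B.
def Pre_is_reflected_stolen (points : List (List Int)) : Prop :=
  ∀ p ∈ points, p.length = 2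

instance (points : List (List Int)) : Decidable (Pre_is_reflected_stolen points) := by
  unfold Pre_is_reflected_stolen; infer_instance

def pvWitness_is_reflected_stolen : List (List Int) := [[0, 1], [2, 1], [1, -3]]

def Spec_is_reflected_stolen (points : List (List Int)) (out : Bool) : Prop := out = is_reflected_stolen_alt points
instance (points : List (List Int)) (out : Bool) : Decidable (Spec_is_reflected_stolen points out) := by unfold Spec_is_reflected_stolen; infer_instance

-- ===== CLAIM (what is proved, stated in full; the proofs are below) =====
def Claim_equal_is_reflected_stolen : Prop := ∀ (points : List (List Int)), Dom_is_reflected_stolen points → Pre_is_reflected_stolen points → Spec_is_reflected_stolen points (is_reflected_stolen points)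

-- ===== LEMMAS AND PROOFS =====

-- ---- the grouping invariant: membership in the per-y sets ----
def GInv (d : PySem.Dict Int (PySem.Set Int)) (R : Int → Int → Prop) : Prop :=
  ∀ y x, (∃ s, d.get? y = some s ∧ x ∈ s) ↔ R y x

theorem ginv_fold (l : List (List Int)) :
    ∀ (d : PySem.Dict Int (PySem.Set Int)) (R : Int → Int → Prop), GInv d R →
      GInv (l.foldl stepG d) (fun y x => R y x ∨ ∃ p ∈ l, pyv p = y ∧ pxv p = x) := by
  induction l with
  | nil => intro d R h y x; simpa using h y x
  | cons p t ih =>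
    intro d R h y x
    have hstep : GInv (stepG d p) (fun y x => R y x ∨ (pyv p = y ∧ pxv p = x)) := by
      intro y x
      unfold stepG PySem.Dict.modify
      by_cases hy : y = pyv p
      · subst hy
        rw [PySem.Dict.get?_insert_self]
        constructor
        · rintro ⟨s, hs, hx⟩
          obtain rfl : ((d.getD (pyv p) PySem.Set.empty).add (pxv p)) = s := by
            simpa using hs
          rw [PySem.Set.mem_add] at hx
          rcases hx with hx | hx
          · left
            rw [← h (pyv p) x]
            cases hg : d.get? (pyv p) with
            | none => simp [PySem.Dict.getD, hg, PySem.Set.empty] at hx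
            | some s0 => exact ⟨s0, rfl, by simpa [PySem.Dict.getD, hg] using hx⟩
          · exact Or.inr ⟨rfl, hx.symm⟩
        · rintro (hr | ⟨-, hx⟩)
          · rw [← h (pyv p) x] at hr
            obtain ⟨s0, hs0, hx0⟩ := hr
            exact ⟨_, rfl, by rw [PySem.Set.mem_add]; exact Or.inl (by simpa [PySem.Dict.getD, hs0] using hx0)⟩
          · exact ⟨_, rfl, by rw [PySem.Set.mem_add]; exact Or.inr hx.symm⟩
      · rw [PySem.Dict.get?_insert_of_ne _ _ hy]
        constructor
        · rintro ⟨s, hs, hx⟩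
          exact Or.inl ((h y x).mp ⟨s, hs, hx⟩)
        · rintro (hr | ⟨hyp, -⟩)
          · exact (h y x).mpr hr
          · exact absurd hyp.symm hy
    have hmain := ih (stepG d p) _ hstep y x
    rw [List.foldl_cons, hmain]
    constructor
    · rintro ((hr | hp) | ⟨q, hq, h1, h2⟩)
      · exact Or.inl hr
      · exact Or.inr ⟨p, List.mem_cons_self .., hp⟩
      · exact Or.inr ⟨q, List.mem_cons_of_mem _ hq, h1, h2⟩
    · rintro (hr | ⟨q, hq, h1, h2⟩)
      · exact Or.inl (Or.inl hr)
      · rcases List.mem_cons.mp hq with rfl | hq'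
        · exact Or.inl (Or.inr ⟨h1, h2⟩)
        · exact Or.inr ⟨q, hq', h1, h2⟩

theorem ginv_groups (points : List (List Int)) :
    GInv (points.foldl stepG PySem.Dict.empty)
      (fun y x => ∃ p ∈ points, pyv p = y ∧ pxv p = x) := by
  have h0 : GInv (PySem.Dict.empty) (fun _ _ => False) := by
    intro y x; simp [PySem.Dict.get?_empty]
  have hmain := ginv_fold points PySem.Dict.empty _ h0
  intro y x; simpa using hmain y x

theorem keys_groups (points : List (List Int)) :
    (points.foldl stepG PySem.Dict.empty).keys = PySem.Set.ofList (points.map pyv) := by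
  have h := PySem.Dict.keys_foldl_modify_key points pyv PySem.Set.empty
      (fun _ p s => s.add (pxv p)) PySem.Dict.empty
  simpa [stepG, PySem.Set.update, PySem.Set.ofList, PySem.Dict.keys, PySem.Dict.empty,
    PySem.Set.empty] using h

-- every group set stays duplicate-free through the grouping fold
theorem nodup_groups (points : List (List Int)) :
    ∀ y s, (points.foldl stepG PySem.Dict.empty).get? y = some s → s.Nodup := by
  suffices h : ∀ (d : PySem.Dict Int (PySem.Set Int)),
      (∀ y s, d.get? y = some s → s.Nodup) →
      ∀ y s, (points.foldl stepG d).get? y = some s → s.Nodup by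
    exact h PySem.Dict.empty (by intro y s hs; simp [PySem.Dict.get?_empty] at hs)
  induction points with
  | nil => intro d hd; exact hd
  | cons p t ih =>
    intro d hd
    rw [List.foldl_cons]
    refine ih (stepG d p) ?_
    intro y s hs
    unfold stepG PySem.Dict.modify at hs
    by_cases hy : y = pyv p
    · subst hy
      rw [PySem.Dict.get?_insert_self] at hs
      obtain rfl : ((d.getD (pyv p) PySem.Set.empty).add (pxv p)) = s := by simpa using hs
      have hbase : (d.getD (pyv p) PySem.Set.empty).Nodup := by
        cases hg : d.get? (pyv p) with
        | none => simp [PySem.Dict.getD, hg, PySem.Set.empty]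
        | some s0 => simpa [PySem.Dict.getD, hg] using hd _ _ hg
      exact PySem.Set.nodup_add _ (pxv p) hbase
    · rw [PySem.Dict.get?_insert_of_ne _ _ hy] at hs
      exact hd _ _ hs

-- ---- the palindrome characterisation of mirror-closure on a strictly sorted list ----
theorem pal_iff (summ : Int) (xs : List Int) (h : xs.Pairwise (· < ·)) :
    (xs = xs.reverse.map (fun x => summ - x)) ↔ ∀ x ∈ xs, summ - x ∈ xs := by
  constructor
  · intro heq x hx
    rw [heq]
    simp only [List.mem_map, List.mem_reverse]
    exact ⟨x, hx, rfl⟩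
  · intro hcl
    have hnd : xs.Nodup := h.imp (fun hlt => ne_of_lt hlt)
    have hndr : (xs.reverse.map (fun x => summ - x)).Nodup := by
      refine (List.nodup_reverse.mpr hnd).map ?_
      intro a b hab; dsimp at hab; omega
    have hmem : ∀ x, x ∈ xs.reverse.map (fun x => summ - x) ↔ x ∈ xs := by
      intro x
      simp only [List.mem_map, List.mem_reverse]
      constructor
      · rintro ⟨y, hy, rfl⟩; exact hcl y hy
      · intro hx
        refine ⟨summ - x, hcl x hx, by omega⟩
    have hperm : xs.Perm (xs.reverse.map (fun x => summ - x)) :=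
      (List.perm_ext_iff_of_nodup hnd hndr).mpr (fun a => (hmem a).symm)
    have hpw : (xs.reverse.map (fun x => summ - x)).Pairwise (· < ·) := by
      rw [List.pairwise_map, List.pairwise_reverse]
      exact h.imp (fun hlt => by omega)
    exact PySem.List.eq_of_perm_of_pairwise_le_of_injective (fun x => x)
      (fun a b hab => hab) hperm (h.imp le_of_lt) (hpw.imp le_of_lt)

theorem mirrorSorted_iff (summ : Int) (s : PySem.Set Int) (hnd : s.Nodup) :
    mirrorSorted summ s = true ↔ ∀ x ∈ s, summ - x ∈ s := by
  unfold mirrorSorted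
  have hperm := PySem.List.sorted_perm s (fun x : Int => x) false
  have hle := PySem.List.sorted_pairwise s (fun x : Int => x)
  have hxnd : (PySem.List.sorted s (fun x : Int => x) false).Nodup := hperm.nodup_iff.mpr hnd
  have hlt : (PySem.List.sorted s (fun x : Int => x) false).Pairwise (· < ·) :=
    (hle.and hxnd).imp (fun ⟨h1, h2⟩ => lt_of_le_of_ne h1 h2)
  rw [beq_iff_eq, pal_iff summ _ hlt]
  constructor
  · intro hcl x hx
    have := hcl x ((PySem.List.mem_sorted ..).mpr hx)
    exact (PySem.List.mem_sorted ..).mp this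
  · intro hcl x hx
    have := hcl x ((PySem.List.mem_sorted ..).mp hx)
    exact (PySem.List.mem_sorted ..).mpr this

-- ---- both final checks say: every mirrored point is present ----
def Mirror (points : List (List Int)) (summ : Int) : Prop :=
  ∀ p ∈ points, ∃ q ∈ points, pyv q = pyv p ∧ pxv q = summ - pxv p

theorem a_check_iff (points : List (List Int)) (summ : Int) :
    (points.all (fun p =>
        (PySem.Set.ofList (points.map (fun q => (pxv q, pyv q)))).contains
          (summ - pxv p, pyv p)) = true)
      ↔ Mirror points summ := by
  simp only [List.all_eq_true, PySem.Set.contains_iff, PySem.Set.mem_ofList, List.mem_map,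
    Mirror, Prod.mk.injEq]
  constructor
  · intro h p hp
    obtain ⟨q, hq, h1, h2⟩ := h p hp
    exact ⟨q, hq, h2, h1⟩
  · intro h p hp
    obtain ⟨q, hq, h1, h2⟩ := h p hp
    exact ⟨q, hq, h2, h1⟩

theorem b_check_iff (points : List (List Int)) (summ : Int) :
    ((points.foldl stepG PySem.Dict.empty).values.all (mirrorSorted summ) = true)
      ↔ Mirror points summ := by
  set g := points.foldl stepG PySem.Dict.empty with hg
  have hinv := ginv_groups points
  have hndv := nodup_groups points
  have hnd : g.keys.Nodup := by
    rw [hg, keys_groups]; exact PySem.Set.nodup_ofList _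
  simp only [PySem.Dict.values, List.all_map, List.all_eq_true, Function.comp]
  constructor
  · -- every group passes the palindrome test ⇒ every point's mirror exists
    intro h p hp
    have hk : pyv p ∈ g.keys := by
      rw [hg, keys_groups, PySem.Set.mem_ofList]
      exact List.mem_map.mpr ⟨p, hp, rfl⟩
    obtain ⟨s, hs⟩ : ∃ s, g.get? (pyv p) = some s := by
      cases hgp : g.get? (pyv p) with
      | none => exact absurd ((PySem.Dict.get?_eq_none_iff_not_mem_keys ..).mp hgp) (by simpa)
      | some s => exact ⟨s, rfl⟩
    have hx : pxv p ∈ s := by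
      obtain ⟨s', hs', hx'⟩ := (hinv (pyv p) (pxv p)).mpr ⟨p, hp, rfl, rfl⟩
      rw [hs] at hs'; cases hs'; exact hx'
    have hpass := h (pyv p, s) (PySem.Dict.mem_items_of_get?_eq_some g hs)
    have hmem := (mirrorSorted_iff summ s (hndv _ _ hs)).mp hpass (pxv p) hx
    obtain ⟨q, hq, h1, h2⟩ := (hinv (pyv p) (summ - pxv p)).mp ⟨s, hs, hmem⟩
    exact ⟨q, hq, h1, h2⟩
  · -- every point's mirror exists ⇒ every group is mirror-closed, hence a palindrome
    intro h kv hkv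
    obtain ⟨y, s⟩ := kv
    have hget : g.get? y = some s := PySem.Dict.get?_of_mem_items g hkv hnd
    rw [mirrorSorted_iff summ s (hndv _ _ hget)]
    intro x hx
    obtain ⟨p, hp, hpy, hpx⟩ := (hinv y x).mp ⟨s, hget, hx⟩
    obtain ⟨q, hq, h1, h2⟩ := h p hp
    obtain ⟨s', hs', hx'⟩ := (hinv y (summ - x)).mpr ⟨q, hq, by rw [h1, hpy], by rw [h2, hpx]⟩
    rw [hget] at hs'; cases hs'; exact hx'

-- ---- min/max folds ----
theorem foldStepMinA (l : List (List Int)) (a : Int) :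
    l.foldl (fun o p => stepMinA o (pxv p)) (some a)
      = some (l.foldl (fun m p => min m (pxv p)) a) := by
  induction l generalizing a with
  | nil => rfl
  | cons p t ih => simpa [stepMinA] using ih (min a (pxv p))

theorem foldStepMaxA (l : List (List Int)) (a : Int) :
    l.foldl (fun o p => stepMaxA o (pxv p)) (some a)
      = some (l.foldl (fun m p => max m (pxv p)) a) := by
  induction l generalizing a with
  | nil => rfl
  | cons p t ih => simpa [stepMaxA] using ih (max a (pxv p))

-- ===== VERDICT (by name: the statement is the Claim_ definition above) =====
theorem is_reflected_stolen_spec : Claim_equal_is_reflected_stolen := by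
  intro points _ _
  unfold Spec_is_reflected_stolen is_reflected_stolen is_reflected_stolen_alt
  cases points with
  | nil => rfl
  | cons p0 rest =>
    simp only []
    rw [PySem.List.foldl_prod_mk (fun o p => stepMinA o (pxv p))
          (fun (s : Option Int × PySem.Set (Int × Int)) p =>
            (stepMaxA s.1 (pxv p), s.2.add (pxv p, pyv p)))]
    rw [PySem.List.foldl_prod_mk (fun o p => stepMaxA o (pxv p))
          (fun (s : PySem.Set (Int × Int)) p => s.add (pxv p, pyv p))]
    have hmin0 : List.foldl (fun o p => stepMinA o (pxv p)) none (p0 :: rest)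
        = some (rest.foldl (fun m p => min m (pxv p)) (pxv p0)) := by
      rw [List.foldl_cons]; exact foldStepMinA rest (pxv p0)
    have hmax0 : List.foldl (fun o p => stepMaxA o (pxv p)) none (p0 :: rest)
        = some (rest.foldl (fun m p => max m (pxv p)) (pxv p0)) := by
      rw [List.foldl_cons]; exact foldStepMaxA rest (pxv p0)
    have hseen : List.foldl (fun (s : PySem.Set (Int × Int)) p => s.add (pxv p, pyv p))
          PySem.Set.empty (p0 :: rest)
        = PySem.Set.ofList ((p0 :: rest).map (fun q => (pxv q, pyv q))) := by
      show _ = ((p0 :: rest).map (fun q => (pxv q, pyv q))).foldl PySem.Set.add PySem.Set.empty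
      rw [List.foldl_map]
    have hminB : PySem.List.min? ((p0 :: rest).map pxv) (fun x => x)
        = some (rest.foldl (fun m p => min m (pxv p)) (pxv p0)) := by
      rw [List.map_cons, PySem.List.min?_id_cons, List.foldl_map]
    have hmaxB : PySem.List.max? ((p0 :: rest).map pxv) (fun x => x)
        = some (rest.foldl (fun m p => max m (pxv p)) (pxv p0)) := by
      rw [List.map_cons, PySem.List.max?_id_cons, List.foldl_map]
    rw [hmin0, hmax0, hseen, hminB, hmaxB]
    apply Bool.coe_iff_coe.mp
    rw [a_check_iff (p0 :: rest), b_check_iff (p0 :: rest)]
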